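-- pv_equiv track=rewrite | github.com/jakubgania/leetcode-solutions | Python3/calculate-money-in-leetcode-bank.py | totalMoney
-- ===== SOURCE A (Python) =====
-- def totalMoney(n: int) -> int:
--     ans, counter, base = 0, 1, 0
--
--     for item in range(n):
--         if counter > 7:
--             counter = 1
--             base += 1
--
--         ans += base + counter
--         counter += 1
--
--     return ans
-- ===== SOURCE B (Python) =====
-- def totalMoney(n: int) -> int:
--     if n <= 0:
--         return 0
--     w, r = divmod(n, 7)
--     return 28 * w + 7 * w * (w - 1) // 2 + r * w + r * (r + 1) // 2
-- ===== Notes on version B (the rewrite author's own statement) =====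
-- stated objective: faster
-- what changed: Replaced the O(n) day-by-day simulation loop with an O(1) closed-form arithmetic-series formula over full weeks plus the remainder days.
import Mathlib
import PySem

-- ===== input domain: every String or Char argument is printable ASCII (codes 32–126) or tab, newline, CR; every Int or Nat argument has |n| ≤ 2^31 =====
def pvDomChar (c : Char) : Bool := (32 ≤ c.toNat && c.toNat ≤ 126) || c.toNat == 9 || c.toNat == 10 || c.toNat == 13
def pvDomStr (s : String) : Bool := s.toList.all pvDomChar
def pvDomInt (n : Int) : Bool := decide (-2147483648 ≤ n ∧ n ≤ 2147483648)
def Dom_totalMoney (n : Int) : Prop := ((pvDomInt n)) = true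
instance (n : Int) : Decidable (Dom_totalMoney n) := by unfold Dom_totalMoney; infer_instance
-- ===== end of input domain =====

-- B replaces A's O(n) day-by-day simulation loop by an O(1) closed-form
-- arithmetic-series formula (full weeks + remainder days); objective: faster.

-- ===== PORT A =====
-- state = (ans, counter, base); one loop iteration of A's for-body
def pvStepA (s : Int × Int × Int) : Int × Int × Int :=
  let cb := if s.2.1 > 7 then ((1 : Int), s.2.2 + 1) else (s.2.1, s.2.2)
  (s.1 + (cb.2 + cb.1), cb.1 + 1, cb.2)

def totalMoney (n : Int) : Int :=
  ((PySem.List.pyRange 0 n 1).foldl (fun s _ => pvStepA s) (0, 1, 0)).1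

-- ===== PORT B =====
def totalMoney_alt (n : Int) : Int :=
  if n ≤ 0 then 0
  else
    let w := PySem.Int.floordiv n 7
    let r := PySem.Int.mod n 7
    28 * w + PySem.Int.floordiv (7 * w * (w - 1)) 2 + r * w +
      PySem.Int.floordiv (r * (r + 1)) 2

-- ===== PRECONDITION & SPEC =====
def Spec_totalMoney (n : Int) (out : Int) : Prop := out = totalMoney_alt n
instance (n : Int) (out : Int) : Decidable (Spec_totalMoney n out) := by unfold Spec_totalMoney; infer_instance

-- ===== CLAIM (what is proved, stated in full; the proofs are below) =====
def Claim_equal_totalMoney : Prop := ∀ (n : Int), Dom_totalMoney n → Spec_totalMoney n (totalMoney n)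

-- ===== LEMMAS AND PROOFS =====

-- G m = 0 + 1 + … + (m-1)
def pvG : Nat → Int
  | 0 => 0
  | (m+1) => pvG m + m

theorem pvG_two_mul (m : Nat) : 2 * pvG m = (m : Int) * ((m : Int) - 1) := by
  induction m with
  | zero => simp [pvG]
  | succ m ih =>
    have : pvG (m + 1) = pvG m + m := rfl
    rw [this]
    push_cast
    push_cast at ih
    linear_combination ih

-- closed form of A's accumulator after k iterations
def pvM (k : Nat) : Int :=
  28 * ((k / 7 : Nat) : Int) + 7 * pvG (k / 7)
    + ((k % 7 : Nat) : Int) * ((k / 7 : Nat) : Int) + pvG (k % 7 + 1)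

def pvC (k : Nat) : Int := if k = 0 then 1 else (((k - 1) % 7 : Nat) : Int) + 2
def pvB (k : Nat) : Int := if k = 0 then 0 else (((k - 1) / 7 : Nat) : Int)

theorem pvM_step (k : Nat) :
    pvM (k + 1) = pvM k + ((k / 7 : Nat) : Int) + ((k % 7 : Nat) : Int) + 1 := by
  unfold pvM
  rcases Nat.lt_or_ge (k % 7) 6 with h | h
  · have h1 : (k + 1) / 7 = k / 7 := by omega
    have h2 : (k + 1) % 7 = k % 7 + 1 := by omega
    rw [h1, h2]
    have hg : pvG (k % 7 + 1 + 1) = pvG (k % 7 + 1) + (k % 7 + 1) := rfl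
    rw [hg]
    push_cast
    ring
  · have h6 : k % 7 = 6 := by omega
    have h1 : (k + 1) / 7 = k / 7 + 1 := by omega
    have h2 : (k + 1) % 7 = 0 := by omega
    rw [h1, h2, h6]
    have hg : pvG (k / 7 + 1) = pvG (k / 7) + (k / 7) := rfl
    rw [hg]
    have hg1 : pvG (0 + 1) = 0 := by simp [pvG]
    have hg7 : pvG (6 + 1) = 21 := by decide
    rw [hg1, hg7]
    push_cast
    ring

theorem pvLoop_inv (k : Nat) :
    (List.range k).foldl (fun s (_ : Nat) => pvStepA s) (0, 1, 0) = (pvM k, pvC k, pvB k) := by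
  induction k with
  | zero => simp [pvM, pvC, pvB, pvG]
  | succ k ih =>
    rw [List.range_succ, List.foldl_append, ih]
    simp only [List.foldl_cons, List.foldl_nil]
    have hM := pvM_step k
    rcases Nat.eq_zero_or_pos k with hk | hk
    · subst hk
      simp [pvStepA, pvC, pvB, pvM, pvG] at *
    · -- k ≥ 1
      unfold pvStepA pvC pvB
      have hk0 : ¬ k = 0 := by omega
      have hk1 : ¬ k + 1 = 0 := by omega
      simp only [hk0, hk1, ite_false]
      rcases Nat.lt_or_ge ((k - 1) % 7) 6 with h | h
      · -- counter = (k-1)%7+2 ≤ 7, no reset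
        have hlt : ¬ ((((k - 1) % 7 : Nat) : Int) + 2 > 7) := by
          have : ((k - 1) % 7 : Nat) < 7 := Nat.mod_lt _ (by norm_num)
          push_cast
          omega
        simp only [hlt, ite_false]
        have e1 : (k - 1) % 7 + 1 = k % 7 := by omega
        have e2 : (k - 1) / 7 = k / 7 := by omega
        have e3 : (k + 1 - 1) % 7 = k % 7 := by omega
        have e4 : (k + 1 - 1) / 7 = k / 7 := by omega
        refine Prod.ext ?_ (Prod.ext ?_ ?_) <;> simp only [e3, e4] <;> push_cast [hM] <;> omega
      · -- counter = 8, reset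
        have h6 : (k - 1) % 7 = 6 := by
          have : (k - 1) % 7 < 7 := Nat.mod_lt _ (by norm_num)
          omega
        rw [h6]
        have hgt : ((6 : Nat) : Int) + 2 > 7 := by norm_num
        simp only [hgt, if_pos]
        have e1 : k % 7 = 0 := by omega
        have e2 : k / 7 = (k - 1) / 7 + 1 := by omega
        have e3 : (k + 1 - 1) % 7 = 0 := by omega
        have e4 : (k + 1 - 1) / 7 = k / 7 := by omega
        refine Prod.ext ?_ (Prod.ext ?_ ?_) <;> simp only [e3, e4, e2] <;> push_cast [hM, e1, e2] <;> omega

-- close the gap between pvM and B's division formula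
theorem pvM_eq_alt (m : Nat) :
    pvM m = 28 * ((m / 7 : Nat) : Int)
      + PySem.Int.floordiv (7 * ((m / 7 : Nat) : Int) * (((m / 7 : Nat) : Int) - 1)) 2
      + ((m % 7 : Nat) : Int) * ((m / 7 : Nat) : Int)
      + PySem.Int.floordiv (((m % 7 : Nat) : Int) * (((m % 7 : Nat) : Int) + 1)) 2 := by
  have h1 : (7 : Int) * ((m / 7 : Nat) : Int) * (((m / 7 : Nat) : Int) - 1) = 2 * (7 * pvG (m / 7)) := by
    linear_combination (-7) * pvG_two_mul (m / 7)
  have h2 : ((m % 7 : Nat) : Int) * (((m % 7 : Nat) : Int) + 1) = 2 * pvG (m % 7 + 1) := by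
    have hthis := pvG_two_mul (m % 7 + 1)
    have hc : ((m % 7 + 1 : Nat) : Int) = ((m % 7 : Nat) : Int) + 1 := by push_cast; ring
    rw [hc] at hthis
    linear_combination -hthis
  rw [h1, h2, PySem.Int.floordiv_eq_ediv_of_pos (by norm_num), PySem.Int.floordiv_eq_ediv_of_pos (by norm_num),
    Int.mul_ediv_cancel_left _ (by norm_num), Int.mul_ediv_cancel_left _ (by norm_num)]
  unfold pvM
  ring

-- ===== VERDICT (by name: the statement is the Claim_ definition above) =====
theorem totalMoney_spec : Claim_equal_totalMoney := by
  intro n _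
  unfold Spec_totalMoney totalMoney totalMoney_alt
  rcases le_or_gt n 0 with h | h
  · rw [PySem.List.pyRange_one_eq_nil (by omega)]
    simp [h]
  · have hn : ¬ n ≤ 0 := by omega
    rw [PySem.List.pyRange_one, List.foldl_map]
    have hsub : (n - 0).toNat = n.toNat := by omega
    rw [hsub]
    have hfold : (List.range n.toNat).foldl (fun s (k : Nat) => pvStepA s) (0, 1, 0)
        = (pvM n.toNat, pvC n.toNat, pvB n.toNat) := pvLoop_inv n.toNat
    show ((List.range n.toNat).foldl (fun s (k : Nat) => pvStepA s) (0, 1, 0)).1 = _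
    rw [hfold]
    simp only [hn, ite_false]
    have hcast : n = ((n.toNat : Nat) : Int) := by omega
    rw [hcast]
    rw [show ((7:Int)) = ((7:Nat):Int) from rfl, PySem.Int.floordiv_natCast, PySem.Int.mod_natCast]
    exact pvM_eq_alt n.toNat
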